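-- pv_equiv track=rewrite | github.com/vrdi/splitting | functions_in_progress.py | district_splits_dict
-- ===== SOURCE A (Python) =====
-- def district_splits_dict(locality_splits, localities):
--     '''
--     Args:
--         county_splits: a dictionary with keys as district numbers and values Counter() dictionaries
--                         these counter dictionaries have pairs COUNTY_ID : NUM which counts the number of VTDS
--                         in the county in the district
--
--     Returns:
--        district_splits: a dictionary that has as keys the county id and returns as values the
--     districts in that county.
--     '''
--     district_splits = {k:[] for k in localities}
--
--     for locality in localities:
--         districts = {}
--         for district in locality_splits.keys():
--             if locality in locality_splits[district].keys():
--                 district_splits[locality].append(district)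
--     return district_splits
-- ===== SOURCE B (Python) =====
-- def district_splits_dict(locality_splits, localities):
--     '''Invert the mapping in one pass: walk each district's counter once,
--     collecting districts per locality in an index, then give every requested
--     locality occurrence its districts from the index.'''
--     inv = {}
--     for district, counter in locality_splits.items():
--         for locality in counter:
--             inv.setdefault(locality, []).append(district)
--     district_splits = {k: [] for k in localities}
--     for locality in localities:
--         district_splits[locality] = district_splits[locality] + inv.get(locality, [])
--     return district_splits
-- ===== Notes on version B (the rewrite author's own statement) =====
-- stated objective: faster
-- what changed: Instead of A's per-locality scan over every district (O(L*D) membership tests), B makes one unfiltered pass over the districts' counters building a locality->districts index with setdefault, then extends each requested locality occurrence's list from that index.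
import Mathlib
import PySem

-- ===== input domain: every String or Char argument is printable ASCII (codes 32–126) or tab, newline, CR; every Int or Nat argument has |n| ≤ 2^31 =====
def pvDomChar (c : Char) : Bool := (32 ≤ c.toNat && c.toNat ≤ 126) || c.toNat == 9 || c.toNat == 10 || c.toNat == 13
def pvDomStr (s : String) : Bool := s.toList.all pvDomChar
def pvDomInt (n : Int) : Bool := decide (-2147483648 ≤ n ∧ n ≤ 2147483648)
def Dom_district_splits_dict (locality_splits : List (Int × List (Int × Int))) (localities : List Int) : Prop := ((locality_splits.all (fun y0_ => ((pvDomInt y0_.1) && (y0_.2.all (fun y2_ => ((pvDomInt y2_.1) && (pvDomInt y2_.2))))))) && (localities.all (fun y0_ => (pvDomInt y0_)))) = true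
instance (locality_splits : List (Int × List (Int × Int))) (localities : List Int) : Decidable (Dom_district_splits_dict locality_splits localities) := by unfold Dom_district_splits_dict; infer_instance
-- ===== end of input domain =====

-- B inverts the mapping in ONE unfiltered pass over the districts' counters (a
-- setdefault index), then hands every requested locality occurrence its districts
-- from the index — instead of scanning every district once per locality.

-- ===== PORT A =====
-- the dict-of-Counters argument as the Python functions receive it
def pvMkSplits (locality_splits : List (Int × List (Int × Int))) : PySem.Dict Int (PySem.Dict Int Int) :=
  PySem.Dict.ofList (locality_splits.map (fun p => (p.1, PySem.Dict.ofList p.2)))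

-- {k: [] for k in localities}
def pvInitDict (localities : List Int) : PySem.Dict Int (List Int) :=
  localities.foldl (fun d k => d.insert k ([] : List Int)) PySem.Dict.empty

-- literal port of A: for locality in localities: for district in locality_splits.keys():
--   if locality in locality_splits[district].keys(): district_splits[locality].append(district)
-- (the dead local `districts = {}` of the Python is omitted; the key `locality` is always
-- present, so `.append` is `modify` with default [])
def district_splits_dict (locality_splits : List (Int × List (Int × Int))) (localities : List Int) : List (Int × List Int) :=
  let lsd := pvMkSplits locality_splits
  let init := pvInitDict localities
  (localities.foldl (fun d locality =>
      lsd.keys.foldl (fun d district =>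
        if locality ∈ (lsd.getD district PySem.Dict.empty).keys
        then d.modify locality [] (fun l => l ++ [district]) else d) d) init).items

-- ===== PORT B =====
-- literal port of B: inv = {}; for district, counter in locality_splits.items():
--   for locality in counter: inv.setdefault(locality, []).append(district)
-- district_splits = {k: [] for k in localities}
-- for locality in localities: district_splits[locality] = district_splits[locality] + inv.get(locality, [])
-- (setdefault-then-append is `modify` with default []; the last loop rebinds a key
-- the comprehension created, which is `modify` too)
def district_splits_dict_alt (locality_splits : List (Int × List (Int × Int))) (localities : List Int) : List (Int × List Int) :=
  let inv := (pvMkSplits locality_splits).items.foldl (fun inv p =>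
      p.2.keys.foldl (fun inv locality => inv.modify locality [] (fun l => l ++ [p.1])) inv)
      PySem.Dict.empty
  (localities.foldl (fun out locality =>
      out.modify locality [] (fun l => l ++ inv.getD locality [])) (pvInitDict localities)).items

-- ===== PRECONDITION & SPEC =====
def Spec_district_splits_dict (locality_splits : List (Int × List (Int × Int))) (localities : List Int) (out : List (Int × List Int)) : Prop := out = district_splits_dict_alt locality_splits localities
instance (locality_splits : List (Int × List (Int × Int))) (localities : List Int) (out : List (Int × List Int)) : Decidable (Spec_district_splits_dict locality_splits localities out) := by unfold Spec_district_splits_dict; infer_instance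

-- ===== CLAIM (what is proved, stated in full; the proofs are below) =====
def Claim_equal_district_splits_dict : Prop := ∀ (locality_splits : List (Int × List (Int × Int))) (localities : List Int), Dom_district_splits_dict locality_splits localities → Spec_district_splits_dict locality_splits localities (district_splits_dict locality_splits localities)

-- ===== LEMMAS AND PROOFS =====

-- the districts whose counter mentions locality L, in key order (A's per-locality scan)
def pvDlist (lsd : PySem.Dict Int (PySem.Dict Int Int)) (L : Int) : List Int :=
  lsd.keys.filter (fun dk => decide (L ∈ (lsd.getD dk PySem.Dict.empty).keys))

theorem pv_init_keys (locs : List Int) : (pvInitDict locs).keys = PySem.Set.ofList locs := by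
  unfold pvInitDict
  rw [PySem.Dict.keys_foldl_insert (f := fun _ _ => ([] : List Int)), PySem.Dict.keys_empty]
  exact (PySem.Set.ofList_eq_foldl locs).symm

-- A's inner appending fold, after filtering: effect on one entry
theorem pv_getD_appendfold (j : Int) (Ds : List Int) (d : PySem.Dict Int (List Int)) (c : Int) :
    (Ds.foldl (fun d dk => d.modify j [] (fun l => l ++ [dk])) d).getD c []
      = d.getD c [] ++ (if c = j then Ds else []) := by
  rw [← List.foldl_map (f := fun dk : Int => ((j, dk) : Int × Int))
        (g := fun (d : PySem.Dict Int (List Int)) (p : Int × Int) => d.modify p.1 [] (fun l => l ++ [p.2]))]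
  rw [PySem.Dict.getD_foldl_modify_append]
  congr 1
  rw [List.filter_map]
  by_cases hc : c = j
  · subst hc
    simp [Function.comp_def]
  · have hb : (j == c) = false := beq_eq_false_iff_ne.mpr (fun h => hc h.symm)
    simp [Function.comp_def, hb, hc]

theorem pv_keys_appendfold (j : Int) (Ds : List Int) : ∀ (d : PySem.Dict Int (List Int)),
    d.contains j = true →
    (Ds.foldl (fun d dk => d.modify j [] (fun l => l ++ [dk])) d).keys = d.keys := by
  induction Ds with
  | nil => intro d _; rfl
  | cons dk t ih =>
    intro d h
    simp only [List.foldl_cons]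
    have hk2 : (d.modify j [] (fun l => l ++ [dk])).contains j = true := by
      rw [PySem.Dict.contains_modify]; simp
    rw [ih _ hk2, PySem.Dict.keys_modify, PySem.Dict.keys_insert_of_contains _ _ h]

-- A's whole loop (keys preserved, per-entry value)
theorem pv_A_loop (lsd : PySem.Dict Int (PySem.Dict Int Int)) (locs : List Int)
    (d : PySem.Dict Int (List Int)) (hk : ∀ j ∈ locs, d.contains j = true) :
    ((locs.foldl (fun d locality =>
        lsd.keys.foldl (fun d district =>
          if locality ∈ (lsd.getD district PySem.Dict.empty).keys
          then d.modify locality [] (fun l => l ++ [district]) else d) d) d).keys = d.keys)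
    ∧ ∀ L, (locs.foldl (fun d locality =>
        lsd.keys.foldl (fun d district =>
          if locality ∈ (lsd.getD district PySem.Dict.empty).keys
          then d.modify locality [] (fun l => l ++ [district]) else d) d) d).getD L []
        = d.getD L [] ++ (List.replicate (locs.count L) (pvDlist lsd L)).flatten := by
  induction locs generalizing d with
  | nil => exact ⟨rfl, fun L => by simp⟩
  | cons j t ih =>
    have hstep : ∀ (d : PySem.Dict Int (List Int)),
        (lsd.keys.foldl (fun d district =>
          if j ∈ (lsd.getD district PySem.Dict.empty).keys
          then d.modify j [] (fun l => l ++ [district]) else d) d)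
        = (pvDlist lsd j).foldl (fun d dk => d.modify j [] (fun l => l ++ [dk])) d := by
      intro d
      exact PySem.List.foldl_ite_eq_foldl_filter
        (fun district => j ∈ (lsd.getD district PySem.Dict.empty).keys)
        (fun d dk => d.modify j [] (fun l => l ++ [dk])) lsd.keys d
    have hcj : d.contains j = true := hk j (by simp)
    have hkeys1 : ((pvDlist lsd j).foldl (fun d dk => d.modify j [] (fun l => l ++ [dk])) d).keys = d.keys :=
      pv_keys_appendfold j (pvDlist lsd j) d hcj
    have hk2 : ∀ x ∈ t, ((pvDlist lsd j).foldl (fun d dk => d.modify j [] (fun l => l ++ [dk])) d).contains x = true := by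
      intro x hx
      rw [PySem.Dict.contains_eq_decide_mem_keys, hkeys1, ← PySem.Dict.contains_eq_decide_mem_keys]
      exact hk x (by simp [hx])
    have ihx := ih _ hk2
    constructor
    · simp only [List.foldl_cons, hstep]
      rw [ihx.1, hkeys1]
    · intro L
      simp only [List.foldl_cons, hstep]
      rw [ihx.2 L, pv_getD_appendfold]
      by_cases hLj : L = j
      · subst hLj
        rw [List.count_cons_self, List.replicate_succ, List.flatten_cons, if_pos rfl, List.append_assoc]
      · have hjL : ¬ j = L := fun h => hLj h.symm
        simp [hLj, hjL]

-- B's unconditional setdefault/append over one counter's (nodup) keys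
theorem pv_setdefault_step (v : Int) (ks : List Int) (hnd : ks.Nodup) :
    ∀ (d : PySem.Dict Int (List Int)) (L : Int),
    (ks.foldl (fun d loc => d.modify loc [] (fun l => l ++ [v])) d).getD L []
      = d.getD L [] ++ (if L ∈ ks then [v] else []) := by
  induction ks with
  | nil => intro d L; simp
  | cons loc t ih =>
    intro d L
    have hnt : loc ∉ t := (List.nodup_cons.mp hnd).1
    simp only [List.foldl_cons]
    rw [ih hnd.of_cons, PySem.Dict.getD_modify]
    by_cases hLl : L = loc
    · subst hLl
      simp [hnt]
    · simp [hLl]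

-- B's accumulator after the whole pass
theorem pv_inv_loop (items : List (Int × PySem.Dict Int Int)) (hv : ∀ p ∈ items, p.2.keys.Nodup) :
    ∀ (d : PySem.Dict Int (List Int)) (L : Int),
    (items.foldl (fun d p =>
        p.2.keys.foldl (fun d loc => d.modify loc [] (fun l => l ++ [p.1])) d) d).getD L []
      = d.getD L [] ++ (items.filter (fun p => decide (L ∈ p.2.keys))).map (fun p => p.1) := by
  induction items with
  | nil => intro d L; simp
  | cons p t ih =>
    intro d L
    simp only [List.foldl_cons]
    rw [ih (fun q hq => hv q (by simp [hq])), pv_setdefault_step p.1 p.2.keys (hv p (by simp))]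
    by_cases hLk : L ∈ p.2.keys <;> simp [hLk]

-- B's final loop: each occurrence of a (present) locality appends its index entry
theorem pv_extend_loop (g : Int → List Int) (locs : List Int) :
    ∀ (d : PySem.Dict Int (List Int)), (∀ j ∈ locs, d.contains j = true) →
    ((locs.foldl (fun d loc => d.modify loc [] (fun l => l ++ g loc)) d).keys = d.keys)
    ∧ ∀ L, (locs.foldl (fun d loc => d.modify loc [] (fun l => l ++ g loc)) d).getD L []
        = d.getD L [] ++ (List.replicate (locs.count L) (g L)).flatten := by
  induction locs with
  | nil => exact fun d _ => ⟨rfl, fun L => by simp⟩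
  | cons j t ih =>
    intro d hk
    have hcj : d.contains j = true := hk j (by simp)
    have hkeys1 : (d.modify j [] (fun l => l ++ g j)).keys = d.keys := by
      rw [PySem.Dict.keys_modify, PySem.Dict.keys_insert_of_contains _ _ hcj]
    have hk2 : ∀ x ∈ t, (d.modify j [] (fun l => l ++ g j)).contains x = true := by
      intro x hx
      rw [PySem.Dict.contains_eq_decide_mem_keys, hkeys1, ← PySem.Dict.contains_eq_decide_mem_keys]
      exact hk x (by simp [hx])
    have ihx := ih _ hk2
    constructor
    · simp only [List.foldl_cons]
      rw [ihx.1, hkeys1]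
    · intro L
      simp only [List.foldl_cons]
      rw [ihx.2 L, PySem.Dict.getD_modify]
      by_cases hLj : L = j
      · subst hLj
        rw [List.count_cons_self, List.replicate_succ, List.flatten_cons, if_pos rfl, List.append_assoc]
      · rw [if_neg hLj, List.count_cons_of_ne (Ne.symm hLj)]

-- every value stored in pvMkSplits is a Dict.ofList, so its keys are nodup
theorem pv_insert_items_pred (Q : PySem.Dict Int Int → Prop) :
    ∀ (l : List (Int × PySem.Dict Int Int)) (d : PySem.Dict Int (PySem.Dict Int Int)),
    (∀ q ∈ d.items, Q q.2) → (∀ q ∈ l, Q q.2) →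
    ∀ p ∈ (l.foldl (fun d q => d.insert q.1 q.2) d).items, Q p.2 := by
  intro l
  induction l with
  | nil => intro d hd _ p hp; exact hd p hp
  | cons q t ih =>
    intro d hd hl p hp
    simp only [List.foldl_cons] at hp
    refine ih (d.insert q.1 q.2) ?_ (fun r hr => hl r (by simp [hr])) p hp
    intro r hr
    rcases (PySem.Dict.mem_items_insert d q.1 q.2 r).mp hr with h | h
    · rw [h]; exact hl q (by simp)
    · exact hd r h.1

theorem pv_mk_values_nodup (ls : List (Int × List (Int × Int))) :
    ∀ p ∈ (pvMkSplits ls).items, p.2.keys.Nodup := by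
  have h := pv_insert_items_pred (fun c => c.keys.Nodup)
      (ls.map (fun p => (p.1, PySem.Dict.ofList p.2))) PySem.Dict.empty
      (by intro q hq; simp only [show (PySem.Dict.empty : PySem.Dict Int (PySem.Dict Int Int)).items = [] from rfl] at hq; cases hq)
      (by intro q hq; rcases List.mem_map.mp hq with ⟨r, _, rfl⟩; exact PySem.Dict.nodup_keys_ofList r.2)
  intro p hp
  exact h p hp

-- A's key-order scan equals B's item filter
theorem pv_Dlist_eq_filter_items (lsd : PySem.Dict Int (PySem.Dict Int Int)) (hnd : lsd.keys.Nodup) (L : Int) :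
    pvDlist lsd L = (lsd.items.filter (fun p => decide (L ∈ p.2.keys))).map (fun p => p.1) := by
  unfold pvDlist
  simp only [PySem.Dict.keys]
  rw [List.filter_map]
  congr 1
  apply List.filter_congr
  intro p hp
  have hmem : (p.1, p.2) ∈ lsd.items := by simpa using hp
  have := PySem.Dict.getD_of_mem_items lsd hmem hnd PySem.Dict.empty
  simp [this]

-- ===== VERDICT (by name: the statement is the Claim_ definition above) =====
theorem district_splits_dict_spec : Claim_equal_district_splits_dict := by
  intro ls locs _hdom
  unfold Spec_district_splits_dict district_splits_dict district_splits_dict_alt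
  have hik := pv_init_keys locs
  have hnds : (PySem.Set.ofList locs).Nodup := PySem.Set.nodup_ofList locs
  have hcont : ∀ j ∈ locs, (pvInitDict locs).contains j = true := by
    intro j hj
    rw [PySem.Dict.contains_eq_decide_mem_keys, hik]
    simpa using (PySem.Set.mem_ofList locs j).mpr hj
  have hA := pv_A_loop (pvMkSplits ls) locs (pvInitDict locs) hcont
  set inv := (pvMkSplits ls).items.foldl (fun inv p =>
      p.2.keys.foldl (fun inv locality => inv.modify locality [] (fun l => l ++ [p.1])) inv)
      PySem.Dict.empty with hinv
  have hB := pv_extend_loop (fun loc => inv.getD loc []) locs (pvInitDict locs) hcont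
  have hFnd : ((locs.foldl (fun d locality =>
        (pvMkSplits ls).keys.foldl (fun d district =>
          if locality ∈ ((pvMkSplits ls).getD district PySem.Dict.empty).keys
          then d.modify locality [] (fun l => l ++ [district]) else d) d) (pvInitDict locs)).keys).Nodup := by
    rw [hA.1, hik]; exact hnds
  have hGnd : ((locs.foldl (fun out locality =>
        out.modify locality [] (fun l => l ++ inv.getD locality [])) (pvInitDict locs)).keys).Nodup := by
    rw [hB.1, hik]; exact hnds
  rw [PySem.Dict.items_eq_map_keys _ hFnd ([] : List Int),
      PySem.Dict.items_eq_map_keys _ hGnd ([] : List Int), hA.1, hB.1, hik]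
  apply List.map_congr_left
  intro L hL
  have hinvL : inv.getD L [] = ((pvMkSplits ls).items.filter (fun p => decide (L ∈ p.2.keys))).map (fun p => p.1) := by
    rw [hinv, pv_inv_loop (pvMkSplits ls).items (pv_mk_values_nodup ls) PySem.Dict.empty L]
    simp
  rw [hA.2 L, hB.2 L,
      pv_Dlist_eq_filter_items (pvMkSplits ls) (PySem.Dict.nodup_keys_ofList _) L]
  simp [hinvL]
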